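-- pv_equiv track=rewrite | github.com/samirvithlani/club-6-python | advtask/filt3.py | containsAlphaAndDigit
-- ===== SOURCE A (Python) =====
-- def containsAlphaAndDigit(n):
--     # has_alpha = any(char.isalpha() for char in n)
--     # has_digit = any(char.isdigit() for char in n)
--     # return has_alpha and has_digit
--     has_alpha = False
--     has_digit = False
--
--     for char in n:
--         if char.isalpha():
--             has_alpha = True
--             break
--
--     for char in n:
--         if char.isdigit():
--             has_digit = True
--             break
--
--     return has_alpha and has_digit
-- ===== SOURCE B (Python) =====
-- def containsAlphaAndDigit(n):
--     has_alpha = False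
--     has_digit = False
--     for char in n:
--         if char.isalpha():
--             has_alpha = True
--         if char.isdigit():
--             has_digit = True
--         if has_alpha and has_digit:
--             break
--     return has_alpha and has_digit
-- ===== Notes on version B (the rewrite author's own statement) =====
-- stated objective: alternative
-- what changed: Replaces A's two separate scans (one for a letter, one for a digit, each with its own early break) with a single combined pass maintaining both flags and breaking once both are set.
import Mathlib
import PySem

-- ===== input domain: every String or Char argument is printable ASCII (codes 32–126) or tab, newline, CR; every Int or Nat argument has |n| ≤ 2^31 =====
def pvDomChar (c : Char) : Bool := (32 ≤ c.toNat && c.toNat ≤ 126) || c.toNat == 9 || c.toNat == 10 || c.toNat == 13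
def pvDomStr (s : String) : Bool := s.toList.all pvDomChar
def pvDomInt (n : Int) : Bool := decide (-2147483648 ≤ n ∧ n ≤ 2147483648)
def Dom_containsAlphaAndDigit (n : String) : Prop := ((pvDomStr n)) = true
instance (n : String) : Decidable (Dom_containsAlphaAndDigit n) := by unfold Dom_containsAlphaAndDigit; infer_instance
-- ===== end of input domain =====

-- B replaces A's two separate scans with one combined pass keeping both flags; same behaviour, alternative decomposition.


-- ===== PORT A =====
-- first loop of A: scan for a letter, break on the first hit
def pvScanAlpha : List Char → Bool
  | [] => false
  | c :: cs => if PySem.Chars.isalpha c then true else pvScanAlpha cs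

-- second loop of A: scan for a digit, break on the first hit
def pvScanDigit : List Char → Bool
  | [] => false
  | c :: cs => if PySem.Chars.isdigit c then true else pvScanDigit cs

def containsAlphaAndDigit (n : String) : Bool :=
  pvScanAlpha n.toList && pvScanDigit n.toList

-- ===== PORT B =====
-- single combined pass over the characters, breaking once both flags are set
def pvScanBoth : List Char → Bool → Bool → Bool × Bool
  | [], a, d => (a, d)
  | c :: cs, a, d =>
    let a := if PySem.Chars.isalpha c then true else a
    let d := if PySem.Chars.isdigit c then true else d
    if a && d then (a, d) else pvScanBoth cs a d

def containsAlphaAndDigit_alt (n : String) : Bool :=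
  let r := pvScanBoth n.toList false false
  r.1 && r.2

-- ===== PRECONDITION & SPEC =====
def Spec_containsAlphaAndDigit (n : String) (out : Bool) : Prop := out = containsAlphaAndDigit_alt n
instance (n : String) (out : Bool) : Decidable (Spec_containsAlphaAndDigit n out) := by unfold Spec_containsAlphaAndDigit; infer_instance

-- ===== CLAIM (what is proved, stated in full; the proofs are below) =====
def Claim_equal_containsAlphaAndDigit : Prop := ∀ (n : String), Dom_containsAlphaAndDigit n → Spec_containsAlphaAndDigit n (containsAlphaAndDigit n)

-- ===== LEMMAS AND PROOFS =====
theorem pvScanAlpha_any (l : List Char) : pvScanAlpha l = l.any PySem.Chars.isalpha := by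
  induction l with
  | nil => rfl
  | cons c cs ih => cases h : PySem.Chars.isalpha c <;> simp [pvScanAlpha, h, ih]

theorem pvScanDigit_any (l : List Char) : pvScanDigit l = l.any PySem.Chars.isdigit := by
  induction l with
  | nil => rfl
  | cons c cs ih => cases h : PySem.Chars.isdigit c <;> simp [pvScanDigit, h, ih]

theorem pvScanBoth_and (l : List Char) (a d : Bool) :
    ((pvScanBoth l a d).1 && (pvScanBoth l a d).2)
      = ((a || l.any PySem.Chars.isalpha) && (d || l.any PySem.Chars.isdigit)) := by
  induction l generalizing a d with
  | nil => simp [pvScanBoth]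
  | cons c cs ih =>
    cases hA : PySem.Chars.isalpha c <;> cases hD : PySem.Chars.isdigit c <;>
      cases a <;> cases d <;> simp [pvScanBoth, hA, hD, ih]

-- ===== VERDICT (by name: the statement is the Claim_ definition above) =====
theorem containsAlphaAndDigit_spec : Claim_equal_containsAlphaAndDigit := by
  intro n _
  unfold Spec_containsAlphaAndDigit containsAlphaAndDigit containsAlphaAndDigit_alt
  rw [pvScanAlpha_any, pvScanDigit_any, pvScanBoth_and]
  simp
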